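-- pv_equiv track=rewrite | github.com/MolfarUA/CodeWars_Solutions | 1 kyu/Faberge easter eggs crush test [linear]/solution.py | inverses
-- ===== SOURCE A (Python) =====
-- def extended_euclidean_algorithm(a: int, b: int):
--     """ returns a tuple (x, y, d) so that
--         - x * a + y * b == d
--         = d is the greatest common divisor of a and b
--
--         from https://en.wikibooks.org/wiki/Algorithm_Implementation/Mathematics/Extended_Euclidean_algorithm
--     """
--     x0, x1, y0, y1 = 0, 1, 1, 0
--     # invarant: x0 * a + y0 * b == b
--     while a:
--         (q, a), b = divmod(b, a), a
--         y0, y1 = y1, y0 - q * y1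
--         x0, x1 = x1, x0 - q * x1
--     return x0, y0, b
--
-- def inverse(a, m):
--     """ use the extended euclidean algorithm to compute the
--         inverse of a modulo m
--     """
--     (x, y, d) =  extended_euclidean_algorithm(a, m)
--     assert d == 1
--     res = x % m
--     assert a * res % m == 1
--     return res
--
-- def inverses(n, m):
--     """ return the multiplicative inverse mod m for all numbers 1 <= i <=n
--         according to https://en.wikipedia.org/wiki/Modular_multiplicative_inverse
--     """
--     a = {}
--     b = {}
--     a_inv = {}
--     b_inv = {}
--     i_list = list(range(1, n+1))
--     a = {i: i for i in i_list}
--     for i in sorted(i_list):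
--         b[i] = b.get(i-1, 1)*a[i] % m
--     b_inv[n] = inverse(b[n], m)
--     for i in range(n, 1, -1):
--         a_inv[i] = b_inv[i] * b[i-1] % m
--         b_inv[i-1] = b_inv[i] * a[i] % m
--     a_inv[1] = b_inv[1]
--     return a_inv
-- ===== SOURCE B (Python) =====
-- def inverses(n, m):
--     """ multiplicative inverse mod m of every i with 1 <= i <= n,
--         via the linear recurrence inv[i] = -(m // i) * inv[m % i] % m
--         (valid because every residue m % i is again in 1..n, hence coprime to m);
--         each entry is sanity-checked like A's inverse() does """
--     assert n >= 1 and m > 1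
--     inv = [0]
--     for i in range(1, n + 1):
--         inv.append(1 % m if i == 1 else -(m // i) * inv[m % i] % m)
--         assert i * inv[i] % m == 1
--     return {i: inv[i] for i in range(n, 0, -1)}
-- ===== Notes on version B (the rewrite author's own statement) =====
-- stated objective: alternative
-- what changed: A builds prefix-product dicts, inverts only the total product with extended Euclid and walks backwards to recover each inverse; B drops Euclid entirely, validates n >= 1 and m > 1 up front, fills a table left-to-right with the classic linear recurrence inv[i] = -(m//i)*inv[m%i] % m (valid since each residue m%i lies in 1..n and is coprime to m) with A's per-entry sanity assertion, and emits the dict in A's n..1 key order.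
import Mathlib
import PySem

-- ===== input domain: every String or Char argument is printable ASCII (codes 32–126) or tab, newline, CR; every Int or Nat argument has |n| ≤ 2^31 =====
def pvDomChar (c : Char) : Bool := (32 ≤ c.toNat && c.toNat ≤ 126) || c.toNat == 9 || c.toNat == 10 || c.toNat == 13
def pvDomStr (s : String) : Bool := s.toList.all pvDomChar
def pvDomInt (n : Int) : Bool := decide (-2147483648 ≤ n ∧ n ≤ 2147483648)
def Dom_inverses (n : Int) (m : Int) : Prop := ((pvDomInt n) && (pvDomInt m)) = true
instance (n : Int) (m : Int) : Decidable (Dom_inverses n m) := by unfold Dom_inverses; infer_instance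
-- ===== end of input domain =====

-- B replaces A's prefix-product / extended-Euclid / backward-walk construction by the classic
-- linear recurrence inv[i] = -(m // i) * inv[m % i] % m, emitting the dict in A's n..1 key order.

-- ===== PORT A =====
-- extended_euclidean_algorithm: the while loop as recursion on the loop state; terminates because
-- |b % a| < |a| for a ≠ 0 (Python mod has the divisor's sign).
def eea (a b x0 x1 y0 y1 : Int) : Int × Int × Int :=
  if h : a = 0 then (x0, y0, b)
  else
    eea (PySem.Int.mod b a) a x1 (x0 - PySem.Int.floordiv b a * x1)
        y1 (y0 - PySem.Int.floordiv b a * y1)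
termination_by a.natAbs
decreasing_by
  rcases lt_or_gt_of_ne h with hneg | hpos
  · have := PySem.Int.mod_neg_bounds (a := b) hneg; omega
  · have h1 := PySem.Int.mod_nonneg (a := b) hpos
    have h2 := PySem.Int.mod_lt (a := b) hpos; omega

-- inverse(a, m); the two asserts raise outside Pre_ — there the port returns the junk value 0.
def pyInverse (a m : Int) : Int :=
  match eea a m 0 1 1 0 with
  | (x, _, d) =>
    if d = 1 then
      let res := PySem.Int.mod x m
      if PySem.Int.mod (a * res) m = 1 then res else 0
    else 0

def inverses (n : Int) (m : Int) : List (Int × Int) :=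
  let i_list := PySem.List.pyRange 1 (n + 1) 1
  let a : PySem.Dict Int Int := i_list.foldl (fun d i => d.insert i i) PySem.Dict.empty
  let b : PySem.Dict Int Int :=
    (PySem.List.sorted i_list (fun x => x) false).foldl
      (fun d i => d.insert i (PySem.Int.mod (d.getD (i - 1) 1 * a.getD i 0) m)) PySem.Dict.empty
  match b.get? n with
  | none => []   -- Python: KeyError b[n] (n ≤ 0); excluded by Pre_
  | some bn =>
    let b_inv : PySem.Dict Int Int := PySem.Dict.empty.insert n (pyInverse bn m)
    let st :=
      (PySem.List.pyRange n 1 (-1)).foldl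
        (fun (st : PySem.Dict Int Int × PySem.Dict Int Int) i =>
          (st.1.insert i (PySem.Int.mod (st.2.getD i 0 * b.getD (i - 1) 0) m),
           st.2.insert (i - 1) (PySem.Int.mod (st.2.getD i 0 * a.getD i 0) m)))
        (PySem.Dict.empty, b_inv)
    (st.1.insert 1 (st.2.getD 1 0)).items

-- ===== PORT B =====
-- one iteration of Source B's loop body: inv.append(1 % m if i == 1 else -(m // i) * inv[m % i] % m)
-- then assert i * inv[i] % m == 1; a failed assert raises in Python (outside Pre_) — the port
-- appends the junk value 0 there.  (The index m % i is always in range: 0 ≤ m % i < i = len(inv).)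
def invStep (m : Int) (inv : List Int) (i : Int) : List Int :=
  let v : Int := if i = 1 then PySem.Int.mod 1 m
    else PySem.Int.mod (-(PySem.Int.floordiv m i) *
           (PySem.List.pyGet? inv (PySem.Int.mod m i)).getD 0) m
  if PySem.Int.mod (i * v) m = 1 then inv ++ [v] else inv ++ [0]

-- inv = [0]; for i in range(1, n+1): inv.append(...); assert ...
def invTable (n m : Int) : List Int :=
  (PySem.List.pyRange 1 (n + 1) 1).foldl (invStep m) [0]

-- assert n >= 1 and m > 1 (input validation; raises outside Pre_ — the port returns the junk
-- value []), then {i: inv[i] for i in range(n, 0, -1)}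
def inverses_alt (n : Int) (m : Int) : List (Int × Int) :=
  if 1 ≤ n ∧ 1 < m then
    ((PySem.List.pyRange n 0 (-1)).foldl
        (fun (d : PySem.Dict Int Int) i =>
          d.insert i ((PySem.List.pyGet? (invTable n m) i).getD 0)) PySem.Dict.empty).items
  else []

-- ===== PRECONDITION & SPEC =====
-- Exactly the inputs on which A returns: n ≥ 1 (else KeyError), m ≥ 2 (else ZeroDivisionError /
-- AssertionError), and every i in 1..n coprime to m — i.e. n below m's least prime factor
-- (else the assert d == 1 in inverse fails with AssertionError).
def Pre_inverses (n : Int) (m : Int) : Prop :=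
  1 ≤ n ∧ 2 ≤ m ∧ n < m ∧ ∀ d ∈ List.range' 2 (min (n.toNat - 1) 46339), ¬((d : Int) ∣ m)
instance (n : Int) (m : Int) : Decidable (Pre_inverses n m) := by unfold Pre_inverses; infer_instance

def pvWitness_inverses : Int × Int := (4, 7)

def Spec_inverses (n : Int) (m : Int) (out : List (Int × Int)) : Prop := out = inverses_alt n m
instance (n : Int) (m : Int) (out : List (Int × Int)) : Decidable (Spec_inverses n m out) := by unfold Spec_inverses; infer_instance

-- ===== CLAIM (what is proved, stated in full; the proofs are below) =====
def Claim_equal_inverses : Prop := ∀ (n : Int) (m : Int), Dom_inverses n m → Pre_inverses n m → Spec_inverses n m (inverses n m)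

-- ===== LEMMAS AND PROOFS =====

-- B_m-sequence: Bm m k = (k! mod m) as A's prefix-product loop computes it
def Bm (m : Int) : Nat → Int
  | 0 => 1
  | k+1 => PySem.Int.mod (Bm m k * ((k : Int) + 1)) m

-- proof-side names for A's two dict-building folds (definitionally the port's terms)
def aD (n : Int) : PySem.Dict Int Int :=
  (PySem.List.pyRange 1 (n + 1) 1).foldl (fun d i => d.insert i i) PySem.Dict.empty

def bD (n m : Int) (j : Int) : PySem.Dict Int Int :=
  (PySem.List.pyRange 1 (j + 1) 1).foldl
    (fun d i => d.insert i (PySem.Int.mod (d.getD (i - 1) 1 * (aD n).getD i 0) m)) PySem.Dict.empty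

theorem eea_spec (a b x0 x1 y0 y1 : Int) : ∀ (A B : Int), 0 ≤ a → 0 < b →
    x0 * A + y0 * B = b → x1 * A + y1 * B = a →
    (eea a b x0 x1 y0 y1).1 * A + (eea a b x0 x1 y0 y1).2.1 * B = (eea a b x0 x1 y0 y1).2.2
      ∧ (eea a b x0 x1 y0 y1).2.2 = Int.gcd a b := by
  induction a, b, x0, x1, y0, y1 using eea.induct with
  | case1 b x0 x1 y0 y1 =>
    intro A B ha hb h0 h1
    rw [eea]
    simp only [reduceDIte]
    refine ⟨h0, ?_⟩
    rw [Int.gcd_zero_left]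
    omega
  | case2 a b x0 x1 y0 y1 h ih =>
    intro A B ha hb h0 h1
    have hapos : 0 < a := lt_of_le_of_ne ha (Ne.symm h)
    rw [eea]
    simp only [h, reduceDIte]
    have hmn := PySem.Int.mod_nonneg (a := b) hapos
    have hdm := PySem.Int.floordiv_mul_add_mod b a
    have := ih A B hmn hapos h1 (by nlinarith [hdm])
    rw [PySem.Int.mod_eq_emod_of_pos hapos] at this ⊢
    refine ⟨this.1, ?_⟩
    rw [this.2, Int.gcd_emod, Int.gcd_comm]

-- a number in [0, m) with i * r ≡ 1 (mod m) is unique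
theorem modInv_unique (m r s i : Int) (hm : 2 ≤ m) (hr0 : 0 ≤ r) (hr1 : r < m)
    (hs0 : 0 ≤ s) (hs1 : s < m) (h1 : (i * r) % m = 1) (h2 : (i * s) % m = 1) : r = s := by
  have e1 : i * r ≡ 1 [ZMOD m] := by
    unfold Int.ModEq; rw [h1, Int.emod_eq_of_lt (by norm_num) (by omega)]
  have e2 : i * s ≡ 1 [ZMOD m] := by
    unfold Int.ModEq; rw [h2, Int.emod_eq_of_lt (by norm_num) (by omega)]
  have : r ≡ s [ZMOD m] := by
    calc r ≡ r * (i * s) [ZMOD m] := by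
              conv_lhs => rw [(by ring : r = r * 1)]
              exact (Int.ModEq.mul_left r e2).symm
      _ = s * (i * r) := by ring
      _ ≡ s * 1 [ZMOD m] := Int.ModEq.mul_left s e1
      _ = s := by ring
  have h4 : r % m = s % m := this
  rwa [Int.emod_eq_of_lt hr0 hr1, Int.emod_eq_of_lt hs0 hs1] at h4

theorem pyInverse_spec (a m : Int) (hm : 2 ≤ m) (ha : 0 ≤ a) (hg : Int.gcd a m = 1) :
    0 ≤ pyInverse a m ∧ pyInverse a m < m ∧ (a * pyInverse a m) % m = 1 := by
  have hmpos : (0:Int) < m := by omega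
  have hspec := eea_spec a m 0 1 1 0 a m ha hmpos (by ring) (by ring)
  unfold pyInverse
  rcases he : eea a m 0 1 1 0 with ⟨x, y, d⟩
  rw [he] at hspec
  simp only at hspec
  obtain ⟨hbez, hd⟩ := hspec
  rw [hg] at hd
  norm_num at hd
  subst hd
  simp only [reduceIte]
  rw [PySem.Int.mod_eq_emod_of_pos hmpos, PySem.Int.mod_eq_emod_of_pos hmpos]
  have key : (a * (x % m)) % m = 1 := by
    have e0 : a * (x % m) ≡ a * x [ZMOD m] := Int.ModEq.mul_left a (Int.emod_emod_of_dvd x dvd_rfl)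
    have h2 : a * x ≡ 1 [ZMOD m] := by
      have hax : a * x = 1 - y * m := by linarith [hbez]
      rw [hax]
      simpa using (Int.ModEq.refl 1).sub ((Int.modEq_zero_iff_dvd).mpr ⟨y, mul_comm y m⟩)
    have h3 : a * (x % m) % m = 1 % m := e0.trans h2
    rwa [Int.emod_eq_of_lt (a := 1) (by norm_num) (by omega)] at h3
  rw [if_pos key]
  exact ⟨Int.emod_nonneg x (by omega), Int.emod_lt_of_pos x hmpos, key⟩

-- all of 1..n coprime to m ⟺ n below m's least prime factor (the ← direction, which Pre_ gives)
theorem coprime_of_small (n m i : Int) (hm : 2 ≤ m)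
    (hmf : ∀ d : Nat, d < n.toNat + 1 → 2 ≤ d → ¬((d : Int) ∣ m))
    (h1 : 1 ≤ i) (h2 : i ≤ n) : Int.gcd i m = 1 := by
  by_contra hne
  set g := Int.gcd i m with hg
  have hgdvdm : g ∣ m.toNat := by
    have h := Int.gcd_dvd_natAbs_right i m
    rwa [(by omega : m.natAbs = m.toNat)] at h
  have hg0 : g ≠ 0 := by
    intro h0
    have := Nat.eq_zero_of_zero_dvd (h0 ▸ hgdvdm)
    omega
  have hg2 : 2 ≤ g := by
    rcases Nat.lt_or_ge g 2 with h | h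
    · interval_cases g <;> simp_all
    · exact h
  have hp := Nat.minFac_prime (n := g) (by omega)
  have hpi : g.minFac ≤ i.natAbs :=
    Nat.le_of_dvd (by omega) ((Nat.minFac_dvd g).trans (Int.gcd_dvd_natAbs_left i m))
  have hpm : ((g.minFac : Nat) : Int) ∣ m := by
    have h1 : g.minFac ∣ m.toNat := (Nat.minFac_dvd g).trans hgdvdm
    have h2 : ((g.minFac : Nat) : Int) ∣ ((m.toNat : Nat) : Int) := Int.natCast_dvd_natCast.mpr h1
    rwa [(by omega : ((m.toNat : Nat) : Int) = m)] at h2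
  exact hmf g.minFac (by omega) hp.two_le hpm

-- inside Dom (|m| ≤ 2^31) the bounded divisor scan of Pre_ rules out every divisor 2..n:
-- a composite m ≤ 2^31 has a prime factor ≤ 46340, and a prime m exceeds n by Pre_'s n < m
theorem pre_to_all (n m : Int) (hDom : Dom_inverses n m) (h1 : 1 ≤ n) (hm : 2 ≤ m) (hnm : n < m)
    (hq : ∀ d ∈ List.range' 2 (min (n.toNat - 1) 46339), ¬((d : Int) ∣ m)) :
    ∀ d : Nat, d < n.toNat + 1 → 2 ≤ d → ¬((d : Int) ∣ m) := by
  intro d hdn hd2 hdvd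
  have hm31 : m ≤ 2147483648 := by
    unfold Dom_inverses pvDomInt at hDom
    simp only [Bool.and_eq_true, decide_eq_true_eq] at hDom
    omega
  have hdvdN : d ∣ m.toNat := by
    have h := Int.natCast_dvd_natCast.mp (by rwa [(by omega : ((m.toNat : Nat) : Int) = m)] : (d : Int) ∣ ((m.toNat : Nat) : Int))
    exact h
  by_cases hp : m.toNat.Prime
  · rcases hp.eq_one_or_self_of_dvd d hdvdN with h | h <;> omega
  · have hpf := Nat.minFac_prime (n := m.toNat) (by omega)
    have hsq := Nat.minFac_sq_le_self (n := m.toNat) (by omega) hp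
    have hle : m.toNat.minFac ≤ 46340 := by
      rw [pow_two] at hsq
      by_contra hgt
      have hgt' : 46341 ≤ m.toNat.minFac := by omega
      have h2 := Nat.mul_le_mul hgt' hgt'
      omega
    have hpd : m.toNat.minFac ≤ d := Nat.minFac_le_of_dvd hd2 hdvdN
    refine hq m.toNat.minFac (List.mem_range'_1.mpr ⟨hpf.two_le, by omega⟩) ?_
    have h3 : ((m.toNat.minFac : Nat) : Int) ∣ ((m.toNat : Nat) : Int) :=
      Int.natCast_dvd_natCast.mpr (Nat.minFac_dvd _)
    rwa [(by omega : ((m.toNat : Nat) : Int) = m)] at h3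

theorem gcd_mul_one_left (a b m : Int) (h1 : Int.gcd a m = 1) (h2 : Int.gcd b m = 1) :
    Int.gcd (a * b) m = 1 := by
  simp [Int.gcd, Int.natAbs_mul] at *
  exact Nat.Coprime.mul_left h1 h2

theorem Bm_bounds (m : Int) (hm : 2 ≤ m) (k : Nat) : 0 ≤ Bm m k ∧ Bm m k < m := by
  cases k with
  | zero => exact ⟨by simp [Bm], by simp [Bm]; omega⟩
  | succ k =>
    show 0 ≤ PySem.Int.mod (Bm m k * ((k : Int) + 1)) m ∧ PySem.Int.mod (Bm m k * ((k : Int) + 1)) m < m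
    exact ⟨PySem.Int.mod_nonneg _ (by omega), PySem.Int.mod_lt _ (by omega)⟩

theorem Bm_one (m : Int) (hm : 2 ≤ m) : Bm m 1 = 1 := by
  show PySem.Int.mod (1 * ((0:Int) + 1)) m = 1
  rw [PySem.Int.mod_eq_emod_of_pos (by omega)]
  norm_num
  exact Int.emod_eq_of_lt (by norm_num) (by omega)

theorem Bm_gcd (n m : Int) (hm : 2 ≤ m) (hn : ∀ d : Nat, d < n.toNat + 1 → 2 ≤ d → ¬((d : Int) ∣ m)) :
    ∀ k : Nat, (k : Int) ≤ n → Int.gcd (Bm m k) m = 1 := by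
  intro k
  induction k with
  | zero => intro _; simp [Bm, Int.gcd]
  | succ k ih =>
    intro hk
    show Int.gcd (PySem.Int.mod (Bm m k * ((k : Int) + 1)) m) m = 1
    rw [PySem.Int.mod_eq_emod_of_pos (by omega), Int.gcd_emod]
    exact gcd_mul_one_left _ _ _ (ih (by push_cast at hk ⊢; omega))
      (coprime_of_small n m _ hm hn (by push_cast; omega) (by push_cast at hk ⊢; omega))

theorem aD_items (n : Int) :
    (aD n).items = (PySem.List.pyRange 1 (n + 1) 1).map (fun i => (i, i)) := by
  unfold aD
  rw [PySem.Dict.items_foldl_insert_fresh _ (fun i => i) (fun i => i) _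
      (fun a _ => PySem.Dict.contains_empty a) (by simpa using PySem.List.nodup_pyRange_one 1 (n+1))]
  rfl

theorem aD_keys_nodup (n : Int) : (aD n).keys.Nodup := by
  simp only [PySem.Dict.keys, aD_items, List.map_map]
  have he : ((fun x : Int × Int => x.1) ∘ fun i : Int => (i, i)) = fun i => i := rfl
  rw [he, List.map_id']
  exact PySem.List.nodup_pyRange_one 1 (n+1)

theorem aD_getD (n i : Int) (h1 : 1 ≤ i) (h2 : i ≤ n) : (aD n).getD i 0 = i := by
  apply PySem.Dict.getD_of_mem_items
  · rw [aD_items]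
    exact List.mem_map.mpr ⟨i, PySem.List.mem_pyRange_one.mpr ⟨h1, by omega⟩, rfl⟩
  · exact aD_keys_nodup n

theorem bD_keys_nodup (n m j : Int) : (bD n m j).keys.Nodup := by
  unfold bD
  apply PySem.Dict.nodup_keys_foldl_insert
  exact PySem.Dict.nodup_keys_empty

theorem bD_items (n m : Int) (hm : 2 ≤ m) : ∀ j : Nat, (j : Int) ≤ n →
    (bD n m (j : Int)).items = (PySem.List.pyRange 1 ((j : Int) + 1) 1).map (fun i => (i, Bm m i.toNat)) := by
  intro j
  induction j with
  | zero =>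
    intro _
    show (bD n m 0).items = _
    push_cast
    rw [show PySem.List.pyRange 1 (1:Int) 1 = [] from PySem.List.pyRange_one_eq_nil (by norm_num)]
    rfl
  | succ j ih =>
    intro hj
    have hj' : (j : Int) ≤ n := by push_cast at hj ⊢; omega
    have hsplit : PySem.List.pyRange 1 (((j:Nat)+1:Int) + 1) 1
        = PySem.List.pyRange 1 ((j:Int) + 1) 1 ++ [(j:Int) + 1] := by
      push_cast
      exact PySem.List.pyRange_one_succ_right (by omega)
    have hfold : bD n m ((j:Nat)+1:Int)
        = (bD n m (j:Int)).insert ((j:Int)+1)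
            (PySem.Int.mod ((bD n m (j:Int)).getD ((j:Int)+1-1) 1 * (aD n).getD ((j:Int)+1) 0) m) := by
      unfold bD
      push_cast at hsplit ⊢
      rw [hsplit, List.foldl_append]
      rfl
    have hget : (bD n m (j:Int)).getD ((j:Int)+1-1) 1 = Bm m j := by
      rw [show (j:Int)+1-1 = (j:Int) by ring]
      cases j with
      | zero => rfl
      | succ j' =>
        apply PySem.Dict.getD_of_mem_items _ _ (bD_keys_nodup n m _)
        rw [ih hj']
        refine List.mem_map.mpr ⟨((j'+1 : Nat) : Int), PySem.List.mem_pyRange_one.mpr ⟨by push_cast; omega, by push_cast; omega⟩, ?_⟩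
        simp
    have hcont : (bD n m (j:Int)).contains ((j:Int)+1) = false := by
      rw [PySem.Dict.contains_eq_decide_mem_keys]
      simp only [PySem.Dict.keys, ih hj', List.map_map, decide_eq_false_iff_not]
      intro hmem
      obtain ⟨x, hx, he⟩ := List.mem_map.mp hmem
      have := PySem.List.mem_pyRange_one.mp hx
      simp at he
      omega
    push_cast
    rw [hfold, PySem.Dict.items_insert_of_not_contains _ _ hcont, ih hj', hget, hsplit, List.map_append]
    have : ((j:Int)+1).toNat = j + 1 := by omega
    simp only [List.map_cons, List.map_nil, this]
    rw [aD_getD n _ (by omega) (by push_cast at hj; omega)]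
    rfl

theorem bD_getD (n m : Int) (hm : 2 ≤ m) (j k dflt : Int) (hjn : j ≤ n) (h1 : 1 ≤ k)
    (h2 : k ≤ j) : (bD n m j).getD k dflt = Bm m k.toNat := by
  obtain ⟨J, rfl⟩ : ∃ J : Nat, j = (J : Int) := ⟨j.toNat, by omega⟩
  apply PySem.Dict.getD_of_mem_items _ _ (bD_keys_nodup n m _)
  rw [bD_items n m hm J (by omega)]
  exact List.mem_map.mpr ⟨k, PySem.List.mem_pyRange_one.mpr ⟨h1, by omega⟩, rfl⟩

theorem bD_getq (n m : Int) (hm : 2 ≤ m) (hn : 1 ≤ n) :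
    (bD n m n).get? n = some (Bm m n.toNat) := by
  apply PySem.Dict.get?_of_mem_items _ _ (bD_keys_nodup n m _)
  have h := bD_items n m hm n.toNat (by omega)
  rw [(by omega : ((n.toNat : Nat) : Int) = n)] at h
  rw [h]
  exact List.mem_map.mpr ⟨n, PySem.List.mem_pyRange_one.mpr ⟨hn, by omega⟩, rfl⟩

theorem walk (n m : Int) (hn : 1 ≤ n) (hm : 2 ≤ m) (hmf : ∀ d : Nat, d < n.toNat + 1 → 2 ≤ d → ¬((d : Int) ∣ m)) :
    ∀ (k : Nat) (ainv binv : PySem.Dict Int Int), ((k : Int) + 1) ≤ n →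
    (∀ j : Int, j ≤ (k : Int) + 1 → ainv.contains j = false) →
    binv.getD ((k : Int) + 1) 0 = pyInverse (Bm m (((k : Int) + 1)).toNat) m →
    ((PySem.List.pyRange ((k : Int) + 1) 1 (-1)).foldl
        (fun (st : PySem.Dict Int Int × PySem.Dict Int Int) i =>
          (st.1.insert i (PySem.Int.mod (st.2.getD i 0 * (bD n m n).getD (i - 1) 0) m),
           st.2.insert (i - 1) (PySem.Int.mod (st.2.getD i 0 * (aD n).getD i 0) m)))
        (ainv, binv)).1.items
      = ainv.items ++ (PySem.List.pyRange ((k : Int) + 1) 1 (-1)).map (fun j => (j, pyInverse j m)) ∧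
    ((PySem.List.pyRange ((k : Int) + 1) 1 (-1)).foldl
        (fun (st : PySem.Dict Int Int × PySem.Dict Int Int) i =>
          (st.1.insert i (PySem.Int.mod (st.2.getD i 0 * (bD n m n).getD (i - 1) 0) m),
           st.2.insert (i - 1) (PySem.Int.mod (st.2.getD i 0 * (aD n).getD i 0) m)))
        (ainv, binv)).2.getD 1 0 = pyInverse 1 m := by
  intro k
  induction k with
  | zero =>
    intro ainv binv hkn hcont hbin
    rw [PySem.List.pyRange_neg_one_eq_nil (by norm_num)]
    simp only [List.foldl_nil, List.map_nil, List.append_nil]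
    norm_num at hbin
    rw [Bm_one m hm] at hbin
    exact ⟨trivial, hbin⟩
  | succ k ih =>
    intro ainv binv hkn hcont hbin
    have hi : (((k+1 : Nat) : Int) + 1) = (k : Int) + 2 := by push_cast; ring
    rw [hi] at hkn hcont hbin ⊢
    have hit : ((k : Int) + 2).toNat = k + 2 := by omega
    rw [hit] at hbin
    have hkn' : (k : Int) + 1 ≤ n := by omega
    have hb : (bD n m n).getD ((k : Int) + 1) 0 = Bm m (k + 1) := by
      rw [bD_getD n m hm n _ 0 le_rfl (by omega) (by omega),
        (by omega : ((k : Int) + 1).toNat = k + 1)]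
    have ha : (aD n).getD ((k : Int) + 2) 0 = (k : Int) + 2 := aD_getD n _ (by omega) (by omega)
    set u := pyInverse (Bm m (k + 2)) m with hu
    have S2 := pyInverse_spec (Bm m (k + 2)) m hm (Bm_bounds m hm (k+2)).1
      (Bm_gcd n m hm hmf (k+2) (by push_cast; omega))
    have S1 := pyInverse_spec (Bm m (k + 1)) m hm (Bm_bounds m hm (k+1)).1
      (Bm_gcd n m hm hmf (k+1) (by push_cast; omega))
    have Si := pyInverse_spec ((k : Int) + 2) m hm (by omega)
      (coprime_of_small n m _ hm hmf (by omega) (by omega))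
    have hBrec : Bm m (k + 2) = (Bm m (k + 1) * ((k : Int) + 2)) % m := by
      show PySem.Int.mod (Bm m (k+1) * ((k : Int) + 1 + 1)) m = _
      rw [PySem.Int.mod_eq_emod_of_pos (by omega)]
      ring_nf
    have hBmod : Bm m (k + 1) * ((k : Int) + 2) ≡ Bm m (k + 2) [ZMOD m] := by
      unfold Int.ModEq
      rw [← hBrec, Int.emod_eq_of_lt (Bm_bounds m hm (k+2)).1 (Bm_bounds m hm (k+2)).2]
    have hv1 : PySem.Int.mod (u * Bm m (k + 1)) m = pyInverse ((k : Int) + 2) m := by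
      rw [PySem.Int.mod_eq_emod_of_pos (by omega)]
      apply modInv_unique m _ _ ((k : Int) + 2) hm
        (Int.emod_nonneg _ (by omega)) (Int.emod_lt_of_pos _ (by omega)) Si.1 Si.2.1 ?_ Si.2.2
      have e1 : ((k : Int) + 2) * (u * Bm m (k + 1) % m) ≡ Bm m (k + 2) * u [ZMOD m] := by
        calc ((k : Int) + 2) * (u * Bm m (k + 1) % m)
            ≡ ((k : Int) + 2) * (u * Bm m (k + 1)) [ZMOD m] :=
              Int.ModEq.mul_left _ (Int.emod_emod_of_dvd _ dvd_rfl)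
          _ = u * (Bm m (k + 1) * ((k : Int) + 2)) := by ring
          _ ≡ u * Bm m (k + 2) [ZMOD m] := Int.ModEq.mul_left u hBmod
          _ = Bm m (k + 2) * u := by ring
      have h2 : ((k : Int) + 2) * (u * Bm m (k + 1) % m) % m = (Bm m (k + 2) * u) % m := e1
      rw [h2, S2.2.2]
    have hv2 : PySem.Int.mod (u * ((k : Int) + 2)) m = pyInverse (Bm m (k + 1)) m := by
      rw [PySem.Int.mod_eq_emod_of_pos (by omega)]
      apply modInv_unique m _ _ (Bm m (k + 1)) hm
        (Int.emod_nonneg _ (by omega)) (Int.emod_lt_of_pos _ (by omega)) S1.1 S1.2.1 ?_ S1.2.2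
      have e1 : Bm m (k + 1) * (u * ((k : Int) + 2) % m) ≡ Bm m (k + 2) * u [ZMOD m] := by
        calc Bm m (k + 1) * (u * ((k : Int) + 2) % m)
            ≡ Bm m (k + 1) * (u * ((k : Int) + 2)) [ZMOD m] :=
              Int.ModEq.mul_left _ (Int.emod_emod_of_dvd _ dvd_rfl)
          _ = u * (Bm m (k + 1) * ((k : Int) + 2)) := by ring
          _ ≡ u * Bm m (k + 2) [ZMOD m] := Int.ModEq.mul_left u hBmod
          _ = Bm m (k + 2) * u := by ring
      have h2 : Bm m (k + 1) * (u * ((k : Int) + 2) % m) % m = (Bm m (k + 2) * u) % m := e1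
      rw [h2, S2.2.2]
    rw [PySem.List.pyRange_neg_one_cons (by omega), List.foldl_cons]
    have hrw : (k : Int) + 2 - 1 = (k : Int) + 1 := by ring
    rw [hrw]
    simp only [hbin, hb, ha]
    rw [hv1, hv2]
    have hcont' : ∀ j : Int, j ≤ (k : Int) + 1 →
        (ainv.insert ((k : Int) + 2) (pyInverse ((k : Int) + 2) m)).contains j = false := by
      intro j hj
      rw [PySem.Dict.contains_insert]
      simp only [Bool.or_eq_false_iff]
      exact ⟨by simp only [beq_eq_false_iff_ne, ne_eq]; omega, hcont j (by omega)⟩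
    have hbin' : (binv.insert ((k : Int) + 1) (pyInverse (Bm m (k + 1)) m)).getD ((k : Int) + 1) 0
        = pyInverse (Bm m (((k : Int) + 1)).toNat) m := by
      rw [PySem.Dict.getD_insert_self, (by omega : ((k : Int) + 1).toNat = k + 1)]
    obtain ⟨ih1, ih2⟩ := ih _ _ hkn' hcont' hbin'
    refine ⟨?_, ih2⟩
    rw [ih1, PySem.Dict.items_insert_of_not_contains _ _ (hcont _ (by omega)),
      List.map_cons, List.append_assoc]
    rfl

def portA' (n m : Int) : List (Int × Int) :=
  match (bD n m n).get? n with
  | none => []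
  | some bn =>
    let b_inv : PySem.Dict Int Int := PySem.Dict.empty.insert n (pyInverse bn m)
    let st :=
      (PySem.List.pyRange n 1 (-1)).foldl
        (fun (st : PySem.Dict Int Int × PySem.Dict Int Int) i =>
          (st.1.insert i (PySem.Int.mod (st.2.getD i 0 * (bD n m n).getD (i - 1) 0) m),
           st.2.insert (i - 1) (PySem.Int.mod (st.2.getD i 0 * (aD n).getD i 0) m)))
        (PySem.Dict.empty, b_inv)
    (st.1.insert 1 (st.2.getD 1 0)).items

theorem inverses_eq_portA' (n m : Int) : inverses n m = portA' n m := by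
  rw [inverses, portA']
  rw [PySem.List.sorted_eq_self_of_pairwise _ _
    ((PySem.List.pairwise_lt_pyRange_one 1 (n + 1)).imp (fun h => le_of_lt h))]
  exact rfl

theorem A_eq (n m : Int) (hn : 1 ≤ n) (hm : 2 ≤ m) (hmf : ∀ d : Nat, d < n.toNat + 1 → 2 ≤ d → ¬((d : Int) ∣ m)) :
    inverses n m = (PySem.List.pyRange n 1 (-1)).map (fun j => (j, pyInverse j m))
      ++ [(1, pyInverse 1 m)] := by
  rw [inverses_eq_portA', portA', bD_getq n m hm hn]
  simp only []
  have hk : (((n - 1).toNat : Nat) : Int) + 1 = n := by omega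
  have W := walk n m hn hm hmf (n - 1).toNat PySem.Dict.empty
    (PySem.Dict.empty.insert n (pyInverse (Bm m n.toNat) m))
    (by rw [hk])
    (by intro j _; exact PySem.Dict.contains_empty j)
    (by rw [hk, PySem.Dict.getD_insert_self])
  rw [hk] at W
  obtain ⟨W1, W2⟩ := W
  rw [W2]
  have hcont1 : ((PySem.List.pyRange n 1 (-1)).foldl
      (fun (st : PySem.Dict Int Int × PySem.Dict Int Int) i =>
        (st.1.insert i (PySem.Int.mod (st.2.getD i 0 * (bD n m n).getD (i - 1) 0) m),
         st.2.insert (i - 1) (PySem.Int.mod (st.2.getD i 0 * (aD n).getD i 0) m)))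
      (PySem.Dict.empty, PySem.Dict.empty.insert n (pyInverse (Bm m n.toNat) m))).1.contains 1 = false := by
    rw [PySem.Dict.contains_eq_decide_mem_keys]
    simp only [PySem.Dict.keys, W1, decide_eq_false_iff_not]
    intro hmem
    simp only [List.map_append, List.map_map, List.mem_append] at hmem
    rcases hmem with h | h
    · simp [PySem.Dict.empty] at h
    · obtain ⟨x, hx, he⟩ := List.mem_map.mp h
      have := PySem.List.mem_pyRange_neg_one.mp hx
      simp at he
      omega
  rw [PySem.Dict.items_insert_of_not_contains _ _ hcont1, W1]
  rfl

theorem range_split (n : Int) (hn : 1 ≤ n) :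
    PySem.List.pyRange n 0 (-1) = PySem.List.pyRange n 1 (-1) ++ [1] := by
  rw [PySem.List.pyRange_neg_one_eq_reverse, PySem.List.pyRange_neg_one_eq_reverse]
  norm_num
  rw [PySem.List.pyRange_one_cons (by omega)]
  simp

-- ===== B-side lemmas: the linear-recurrence table holds exactly the pyInverse values =====

theorem pyInverse_one (m : Int) (hm : 2 ≤ m) : pyInverse 1 m = 1 := by
  have S := pyInverse_spec 1 m hm (by norm_num) (by simp [Int.gcd])
  have h := S.2.2
  rw [one_mul, Int.emod_eq_of_lt S.1 S.2.1] at h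
  exact h

-- the value stored at index i of the invariant table
theorem table_lookup (m : Int) (j : Nat) (i : Int) (h1 : 1 ≤ i) (h2 : i ≤ (j : Int)) :
    (PySem.List.pyGet? (0 :: (List.range' 1 j).map (fun (k : Nat) => pyInverse (k : Int) m)) i).getD 0
      = pyInverse i m := by
  obtain ⟨k, rfl⟩ : ∃ k : Nat, i = ((k : Nat) : Int) := ⟨i.toNat, by omega⟩
  rw [PySem.List.pyGet?_natCast]
  obtain ⟨k', rfl⟩ : ∃ k' : Nat, k = k' + 1 := ⟨k - 1, by omega⟩
  have hk : k' < ((List.range' 1 j).map (fun (k : Nat) => pyInverse (k : Int) m)).length := by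
    simpa using (by omega : k' < j)
  rw [List.getElem?_cons_succ, List.getElem?_eq_getElem hk]
  simp only [Option.getD_some, List.getElem_map, List.getElem_range'_1]
  rw [show 1 + k' = k' + 1 from by omega]

theorem invTable_spec (n m : Int) (hm : 2 ≤ m)
    (hmf : ∀ d : Nat, d < n.toNat + 1 → 2 ≤ d → ¬((d : Int) ∣ m)) :
    ∀ j : Nat, 1 ≤ j → (j : Int) ≤ n →
    invTable (j : Int) m = 0 :: (List.range' 1 j).map (fun (k : Nat) => pyInverse (k : Int) m) := by
  intro j
  induction j with
  | zero => intro h; omega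
  | succ j ih =>
    intro _ hjn
    by_cases hj0 : j = 0
    · subst hj0
      have hm1 : PySem.Int.mod 1 m = 1 := by
        rw [PySem.Int.mod_eq_emod_of_pos (by omega : (0:Int) < m)]
        exact Int.emod_eq_of_lt (by norm_num) (by omega)
      have h1 : invTable (((0:Nat)+1 : Nat) : Int) m = [0, 1] := by
        unfold invTable
        rw [show PySem.List.pyRange 1 ((((0:Nat)+1 : Nat) : Int) + 1) 1 = [1] by decide]
        show invStep m [0] 1 = [0, 1]
        simp [invStep, hm1]
      rw [h1, show List.range' 1 (0+1) = [1] from rfl]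
      simp only [List.map_cons, List.map_nil]
      rw [show ((1:Nat):Int) = 1 from rfl, pyInverse_one m hm]
    · have hj1 : 1 ≤ j := by omega
      have hjn' : (j : Int) ≤ n := by push_cast at hjn ⊢; omega
      have IH := ih hj1 hjn'
      -- peel the last loop iteration: invTable (j+1) = invStep m (invTable j) (j+1)
      have hsplit : PySem.List.pyRange 1 (((j:Nat)+1:Int) + 1) 1
          = PySem.List.pyRange 1 ((j:Int) + 1) 1 ++ [(j:Int) + 1] := by
        push_cast
        exact PySem.List.pyRange_one_succ_right (by omega)
      have hfold : invTable ((j:Nat)+1:Int) m = invStep m (invTable (j:Int) m) ((j:Int)+1) := by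
        unfold invTable
        push_cast at hsplit ⊢
        rw [hsplit, List.foldl_append]
        rfl
      -- the residue r = m % (j+1) lies in 1..j, so its inverse is already in the table
      set r := PySem.Int.mod m ((j:Int)+1) with hr
      have hrE : r = m % ((j:Int)+1) := by rw [hr, PySem.Int.mod_eq_emod_of_pos (by omega)]
      have hr0 : 0 ≤ r := by rw [hrE]; exact Int.emod_nonneg _ (by omega)
      have hrlt : r < (j:Int)+1 := by rw [hrE]; exact Int.emod_lt_of_pos _ (by omega)
      have hr1 : 1 ≤ r := by
        rcases lt_or_ge r 1 with h | h
        · exfalso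
          have hdvd : ((j:Int)+1) ∣ m := by
            have : m % ((j:Int)+1) = 0 := by omega
            exact Int.dvd_of_emod_eq_zero this
          have := hmf (j+1) (by omega) (by omega)
          rw [(by push_cast; ring : ((j+1 : Nat) : Int) = (j:Int)+1)] at this
          exact this hdvd
        · exact h
      have Sr := pyInverse_spec r m hm hr0 (coprime_of_small n m r hm hmf hr1 (by omega))
      have Sj := pyInverse_spec ((j:Int)+1) m hm (by omega)
        (coprime_of_small n m _ hm hmf (by omega) (by omega))
      -- the appended value is the canonical inverse of j+1
      have hq := PySem.Int.floordiv_mul_add_mod m ((j:Int)+1)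
      set q := PySem.Int.floordiv m ((j:Int)+1) with hqdef
      have hlook : (PySem.List.pyGet? (invTable (j:Int) m) r).getD 0 = pyInverse r m := by
        rw [IH]; exact table_lookup m j r hr1 (by omega)
      have hval : PySem.Int.mod (-q * pyInverse r m) m = pyInverse ((j:Int)+1) m := by
        rw [PySem.Int.mod_eq_emod_of_pos (by omega)]
        apply modInv_unique m _ _ ((j:Int)+1) hm
          (Int.emod_nonneg _ (by omega)) (Int.emod_lt_of_pos _ (by omega)) Sj.1 Sj.2.1 ?_ Sj.2.2
        have e1 : ((j:Int)+1) * (-q * pyInverse r m % m) ≡ r * pyInverse r m [ZMOD m] := by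
          calc ((j:Int)+1) * (-q * pyInverse r m % m)
              ≡ ((j:Int)+1) * (-q * pyInverse r m) [ZMOD m] :=
                Int.ModEq.mul_left _ (Int.emod_emod_of_dvd _ dvd_rfl)
            _ = (r - m) * pyInverse r m := by
                have : q * ((j:Int)+1) + r = m := hq
                nlinarith [this]
            _ ≡ r * pyInverse r m [ZMOD m] := by
                have : r - m ≡ r [ZMOD m] := by
                  simpa using (Int.ModEq.refl r).sub ((Int.modEq_zero_iff_dvd).mpr dvd_rfl)
                exact this.mul_right _
        have h2 : ((j:Int)+1) * (-q * pyInverse r m % m) % m = (r * pyInverse r m) % m := e1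
        rw [h2, Sr.2.2]
      have hassert : PySem.Int.mod (((j:Int)+1) * pyInverse ((j:Int)+1) m) m = 1 := by
        rw [PySem.Int.mod_eq_emod_of_pos (by omega : (0:Int) < m)]; exact Sj.2.2
      push_cast
      rw [hfold]
      simp only [invStep]
      rw [if_neg (by omega : ¬((j:Int)+1 = 1))]
      rw [← hr, hlook, ← hqdef, hval, if_pos hassert, IH]
      rw [show List.range' 1 (j+1) = List.range' 1 j ++ [1+j] from List.range'_1_concat ..,
        List.map_append]
      simp only [List.map_cons, List.map_nil, List.cons_append]
      rw [show ((1+j : Nat) : Int) = (j : Int) + 1 by push_cast; ring]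

theorem B_eq (n m : Int) (hn : 1 ≤ n) (hm : 2 ≤ m)
    (hmf : ∀ d : Nat, d < n.toNat + 1 → 2 ≤ d → ¬((d : Int) ∣ m)) :
    inverses_alt n m = (PySem.List.pyRange n 1 (-1)).map (fun j => (j, pyInverse j m))
      ++ [(1, pyInverse 1 m)] := by
  rw [inverses_alt, if_pos (show (1:Int) ≤ n ∧ (1:Int) < m from ⟨by omega, by omega⟩)]
  rw [PySem.Dict.items_foldl_insert_fresh _ (fun i => i)
    (fun i => (PySem.List.pyGet? (invTable n m) i).getD 0) _
    (fun a _ => PySem.Dict.contains_empty a)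
    (by
      rw [List.map_id']
      rw [PySem.List.pyRange_neg_one_eq_reverse]
      exact List.nodup_reverse.mpr (PySem.List.nodup_pyRange_one _ _))]
  have hT : invTable n m = 0 :: (List.range' 1 n.toNat).map (fun (k : Nat) => pyInverse (k : Int) m) := by
    have h := invTable_spec n m hm hmf n.toNat (by omega) (by omega)
    rwa [(by omega : ((n.toNat : Nat) : Int) = n)] at h
  have hmap : ∀ i ∈ PySem.List.pyRange n 0 (-1),
      (i, (PySem.List.pyGet? (invTable n m) i).getD 0) = (i, pyInverse i m) := by
    intro i hi
    have hb := PySem.List.mem_pyRange_neg_one.mp hi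
    rw [hT, table_lookup m n.toNat i (by omega) (by omega)]
  rw [List.map_congr_left hmap, range_split n hn, List.map_append]
  rfl

-- ===== VERDICT (by name: the statement is the Claim_ definition above) =====
theorem inverses_spec : Claim_equal_inverses := by
  intro n m hdom hpre
  obtain ⟨hn, hm, hnm, hq⟩ := hpre
  unfold Spec_inverses
  rw [A_eq n m hn hm (pre_to_all n m hdom hn hm hnm hq),
    B_eq n m hn hm (pre_to_all n m hdom hn hm hnm hq)]
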